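-- pv_equiv track=rewrite | github.com/BramvdnHeuvel/AdventOfCode2020 | 14/ex2/main.py | iterate_x
-- ===== SOURCE A (Python) =====
-- from typing import Generator, List
--
-- def iterate_x(values : List[str]) -> Generator[str, None, None]:
--     if 'X' not in values:
--         yield ''.join(values)
--     else:
--         i = values.index('X')
--
--         values[i] = '0'
--         yield from iterate_x(values)
--         values[i] = '1'
--         yield from iterate_x(values)
--         values[i] = 'X'
-- ===== SOURCE B (Python) =====
-- def iterate_x(values):
--     # Collect the positions of the 'X' elements once, enumerate all 0/1
--     # assignments in lexicographic order (first X most significant, '0'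
--     # before '1'), and build each output string from a fresh copy.
--     # Unlike A, this never mutates the input list.
--     xpos = [i for i, v in enumerate(values) if v == 'X']
--     combos = [[]]
--     for _ in range(len(xpos)):
--         combos = [[c] + t for c in '01' for t in combos]
--     for bits in combos:
--         copy = list(values)
--         for p, c in zip(xpos, bits):
--             copy[p] = c
--         yield ''.join(copy)
-- ===== Notes on version B (the rewrite author's own statement) =====
-- stated objective: alternative
-- what changed: Replaces A's mutating recursion (set each X to '0'/'1' in place, recurse, restore) by a single scan collecting the X positions followed by an explicit enumeration of all 0/1 combinations applied to fresh copies; B never mutates the input list.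
import Mathlib
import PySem

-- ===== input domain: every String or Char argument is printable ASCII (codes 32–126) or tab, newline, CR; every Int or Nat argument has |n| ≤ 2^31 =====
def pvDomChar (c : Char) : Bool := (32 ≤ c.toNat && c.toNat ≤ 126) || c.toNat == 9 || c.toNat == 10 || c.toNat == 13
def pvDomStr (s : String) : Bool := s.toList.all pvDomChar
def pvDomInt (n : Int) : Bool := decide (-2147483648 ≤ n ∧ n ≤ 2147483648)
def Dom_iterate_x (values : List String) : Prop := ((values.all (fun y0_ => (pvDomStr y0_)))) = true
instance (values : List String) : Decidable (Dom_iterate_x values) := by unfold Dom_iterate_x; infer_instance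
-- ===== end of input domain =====

-- B replaces A's mutating recursion by one scan for the 'X' positions plus an
-- explicit enumeration of all 0/1 combinations applied to fresh copies
-- (objective: alternative; A's in-place mutation of the argument is restored
-- before A finishes, so only the yielded strings are compared).

-- ===== PORT A =====
-- shared helper, also used for A's termination measure:
-- positions (from offset k) of the elements equal to "X" (B's enumerate+filter)
def xIndicesFrom : Nat → List String → List Nat
  | _, [] => []
  | k, v :: vs => if v = "X" then k :: xIndicesFrom (k+1) vs else xIndicesFrom (k+1) vs

lemma xIndicesFrom_set (c : String) (hc : c ≠ "X") :
    ∀ (values : List String) (k : Nat), "X" ∈ values →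
      xIndicesFrom k values
        = (k + values.idxOf "X") :: xIndicesFrom k (values.set (values.idxOf "X") c) := by
  intro values
  induction values with
  | nil => intro k h; cases h
  | cons v vs ih =>
    intro k h
    by_cases hv : v = "X"
    · subst hv
      simp [xIndicesFrom, List.idxOf_cons_self, hc]
    · have hmem : "X" ∈ vs := by
        cases List.mem_cons.mp h with
        | inl h' => exact absurd h'.symm hv
        | inr h' => exact h'
      have hidx : (v :: vs).idxOf "X" = vs.idxOf "X" + 1 := by
        simp [hv]
      rw [hidx]
      have := ih (k+1) hmem
      simp [xIndicesFrom, hv, List.set_cons_succ, this]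
      omega

lemma index?_getD_eq_idxOf (v : String) :
    ∀ (xs : List String), v ∈ xs → (PySem.List.index? xs v).getD 0 = xs.idxOf v := by
  intro xs
  induction xs with
  | nil => intro h; cases h
  | cons x xs ih =>
    intro h
    by_cases hx : x = v
    · subst hx
      rw [PySem.List.index?_cons_self]
      simp [List.idxOf_cons_self]
    · have hmem : v ∈ xs := by
        cases List.mem_cons.mp h with
        | inl h' => exact absurd h'.symm hx
        | inr h' => exact h'
      have hs : (PySem.List.index? xs v).isSome := (PySem.List.index?_isSome_iff xs v).mpr hmem
      obtain ⟨k, hk⟩ := Option.isSome_iff_exists.mp hs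
      rw [PySem.List.index?_cons_of_ne xs hx, hk]
      have hval := ih hmem
      rw [hk] at hval
      simp at hval
      have hidxc : List.idxOf v (x :: xs) = List.idxOf v xs + 1 := by simp [hx]
      simp [hidxc, hval]

lemma set_measure_lt (values : List String) (hm : "X" ∈ values) (c : String) (hc : c ≠ "X") :
    (xIndicesFrom 0 (values.set ((PySem.List.index? values "X").getD 0) c)).length
      < (xIndicesFrom 0 values).length := by
  rw [index?_getD_eq_idxOf _ _ hm]
  rw [xIndicesFrom_set c hc values 0 hm]
  simp

def iterate_x (values : List String) : List String :=
  if h : "X" ∉ values then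
    [PySem.Str.join "" values]
  else
    let i := (PySem.List.index? values "X").getD 0
    iterate_x (values.set i "0") ++ iterate_x (values.set i "1")
termination_by (xIndicesFrom 0 values).length
decreasing_by
  · exact set_measure_lt values (not_not.mp h) "0" (by decide)
  · exact set_measure_lt values (not_not.mp h) "1" (by decide)

-- ===== PORT B =====
-- all 0/1 combinations of length n, first position most significant, "0" before "1"
def bitCombos : Nat → List (List String)
  | 0 => [[]]
  | n+1 => ["0", "1"].flatMap (fun c => (bitCombos n).map (fun t => c :: t))

-- write the chosen bits at the collected X positions into a copy of values
def applyBits (values : List String) (xpos : List Nat) (bits : List String) : List String :=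
  (xpos.zip bits).foldl (fun acc pb => acc.set pb.1 pb.2) values

def iterate_x_alt (values : List String) : List String :=
  let xpos := xIndicesFrom 0 values
  (bitCombos xpos.length).map (fun bits => PySem.Str.join "" (applyBits values xpos bits))

-- ===== PRECONDITION & SPEC =====
def Spec_iterate_x (values : List String) (out : List String) : Prop := out = iterate_x_alt values
instance (values : List String) (out : List String) : Decidable (Spec_iterate_x values out) := by unfold Spec_iterate_x; infer_instance

-- ===== CLAIM (what is proved, stated in full; the proofs are below) =====
def Claim_equal_iterate_x : Prop := ∀ (values : List String), Dom_iterate_x values → Spec_iterate_x values (iterate_x values)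

-- ===== LEMMAS AND PROOFS =====

lemma xIndicesFrom_of_not_mem : ∀ (values : List String) (k : Nat),
    "X" ∉ values → xIndicesFrom k values = [] := by
  intro values
  induction values with
  | nil => intro k _; rfl
  | cons v vs ih =>
    intro k h
    have hv : v ≠ "X" := fun e => h (by simp [e])
    have : "X" ∉ vs := fun m => h (List.mem_cons_of_mem _ m)
    simp [xIndicesFrom, hv, ih _ this]

lemma applyBits_cons (values : List String) (i : Nat) (r : List Nat)
    (c : String) (bits : List String) :
    applyBits values (i :: r) (c :: bits) = applyBits (values.set i c) r bits := by
  simp [applyBits]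

lemma alt_rec (values : List String) (h : "X" ∈ values) :
    iterate_x_alt values
      = iterate_x_alt (values.set (values.idxOf "X") "0")
        ++ iterate_x_alt (values.set (values.idxOf "X") "1") := by
  have h0 := xIndicesFrom_set "0" (by decide) values 0 h
  have h1 := xIndicesFrom_set "1" (by decide) values 0 h
  set i := values.idxOf "X" with hi
  have hr : xIndicesFrom 0 (values.set i "0") = xIndicesFrom 0 (values.set i "1") := by
    have h01 := h0.symm.trans h1
    injection h01
  simp only [iterate_x_alt, h0, hr]
  simp only [List.length_cons, bitCombos, List.flatMap_cons, List.flatMap_nil,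
    List.append_nil, List.map_append, List.map_map]
  congr 1
  · apply List.map_congr_left; intro bits _
    simp [Function.comp, applyBits_cons]
  · apply List.map_congr_left; intro bits _
    simp [Function.comp, applyBits_cons]

lemma iterate_x_eq_alt : ∀ (n : Nat) (values : List String),
    (xIndicesFrom 0 values).length = n → iterate_x values = iterate_x_alt values := by
  intro n
  induction n with
  | zero =>
    intro values hn
    have hnm : "X" ∉ values := by
      intro h
      rw [xIndicesFrom_set "0" (by decide) values 0 h] at hn
      simp at hn
    rw [iterate_x, dif_pos hnm]
    have hx : xIndicesFrom 0 values = [] := xIndicesFrom_of_not_mem values 0 hnm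
    simp [iterate_x_alt, hx, bitCombos, applyBits]
  | succ n ih =>
    intro values hn
    by_cases h : "X" ∈ values
    · rw [iterate_x, dif_neg (not_not.mpr h)]
      have hidx := index?_getD_eq_idxOf "X" values h
      have h0 := xIndicesFrom_set "0" (by decide) values 0 h
      have h1 := xIndicesFrom_set "1" (by decide) values 0 h
      have l0 : (xIndicesFrom 0 (values.set (values.idxOf "X") "0")).length = n := by
        rw [h0] at hn; simpa using hn
      have l1 : (xIndicesFrom 0 (values.set (values.idxOf "X") "1")).length = n := by
        rw [h1] at hn; simpa using hn
      show iterate_x (values.set ((PySem.List.index? values "X").getD 0) "0")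
            ++ iterate_x (values.set ((PySem.List.index? values "X").getD 0) "1")
          = iterate_x_alt values
      rw [hidx, ih _ l0, ih _ l1, ← alt_rec values h]
    · exfalso
      rw [xIndicesFrom_of_not_mem values 0 h] at hn
      simp at hn

-- ===== VERDICT (by name: the statement is the Claim_ definition above) =====
theorem iterate_x_spec : Claim_equal_iterate_x := by
  intro values _
  exact iterate_x_eq_alt _ values rfl
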